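-- pv_equiv track=rewrite | github.com/CatherineFlower/Discretka | main.py | parse_length_hist
-- ===== SOURCE A (Python) =====
-- def parse_length_hist(rows):
--     """Для code_* CSV — вернуть словарь длина->частота."""
--     if not rows or len(rows) < 2:
--         return {}
--     head = [h.strip().lower() for h in rows[0]]
--     try:
--         length_i = head.index("length")
--     except ValueError:
--         return {}
--     hist = {}
--     for r in rows[1:]:
--         if len(r) <= length_i:
--             continue
--         try:
--             L = int(r[length_i])
--         except Exception:
--             continue
--         hist[L] = hist.get(L, 0) + 1
--     return dict(sorted(hist.items()))
-- ===== SOURCE B (Python) =====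
-- def parse_length_hist(rows):
--     """Sort-then-group-runs: collect parsed lengths, sort, run-length encode."""
--     if not rows or len(rows) < 2:
--         return {}
--     head = [h.strip().lower() for h in rows[0]]
--     try:
--         length_i = head.index("length")
--     except ValueError:
--         return {}
--     vals = []
--     for r in rows[1:]:
--         if len(r) <= length_i:
--             continue
--         try:
--             vals.append(int(r[length_i]))
--         except Exception:
--             continue
--     pairs = []
--     for v in sorted(vals):
--         if pairs and pairs[-1][0] == v:
--             pairs[-1] = (v, pairs[-1][1] + 1)
--         else:
--             pairs.append((v, 1))
--     return dict(pairs)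
-- ===== Notes on version B (the rewrite author's own statement) =====
-- stated objective: alternative
-- what changed: A aggregates with a hash dict (hist[L] = hist.get(L,0)+1) and then sorts the items; B appends each parsed length to a list, sorts it once, and run-length-encodes the sorted list into the ascending (length, frequency) pairs, so no dict counting and no post-sort of pairs.
import Mathlib
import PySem

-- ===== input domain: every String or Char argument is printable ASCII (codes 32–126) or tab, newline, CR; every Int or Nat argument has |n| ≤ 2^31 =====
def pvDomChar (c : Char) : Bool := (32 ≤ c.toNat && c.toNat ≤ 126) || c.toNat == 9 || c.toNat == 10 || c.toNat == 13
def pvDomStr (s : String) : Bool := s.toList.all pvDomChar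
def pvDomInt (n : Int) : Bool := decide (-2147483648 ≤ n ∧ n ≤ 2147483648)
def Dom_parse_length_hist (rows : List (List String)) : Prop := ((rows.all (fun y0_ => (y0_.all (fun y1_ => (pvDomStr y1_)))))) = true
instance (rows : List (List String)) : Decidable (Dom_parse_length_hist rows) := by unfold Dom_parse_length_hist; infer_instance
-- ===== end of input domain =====

-- B replaces A's hash-count-then-sort-items aggregation by collect-sort-then-run-length-encode; same exact result, alternative algorithm (not claimed faster).

-- ===== PORT A =====
def parse_length_hist (rows : List (List String)) : List (Int × Int) :=
  match rows with
  | [] => []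
  | r0 :: rest =>
    if (r0 :: rest).length < 2 then []
    else
      let head := r0.map (fun h => PySem.Str.lower (PySem.Str.strip h))
      match PySem.List.index? head "length" with
      | none => []
      | some li =>
        let hist := rest.foldl (fun d r =>
          if r.length ≤ li then d
          else
            match PySem.List.pyGet? r (li : Int) with
            | none => d
            | some s =>
              match PySem.Int.ofStr? s with
              | none => d
              | some L => d.insert L (d.getD L 0 + 1)) PySem.Dict.empty
        (PySem.Dict.ofList (PySem.List.sorted2 hist.items Prod.fst Prod.snd)).items

-- ===== PORT B =====
-- B-side helper: body of B's run-length loop ('pairs[-1]' = last element)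
def pvAddRun (pairs : List (Int × Int)) (v : Int) : List (Int × Int) :=
  match pairs.getLast? with
  | some kc => if kc.1 == v then pairs.dropLast ++ [(v, kc.2 + 1)] else pairs ++ [(v, 1)]
  | none => pairs ++ [(v, 1)]

def parse_length_hist_alt (rows : List (List String)) : List (Int × Int) :=
  match rows with
  | [] => []
  | r0 :: rest =>
    if (r0 :: rest).length < 2 then []
    else
      let head := r0.map (fun h => PySem.Str.lower (PySem.Str.strip h))
      match PySem.List.index? head "length" with
      | none => []
      | some li =>
        let vals := rest.foldl (fun acc r =>
          if r.length ≤ li then acc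
          else
            match PySem.List.pyGet? r (li : Int) with
            | none => acc
            | some s =>
              match PySem.Int.ofStr? s with
              | none => acc
              | some L => acc ++ [L]) []
        let pairs := (PySem.List.sorted vals (fun x => x)).foldl pvAddRun []
        (PySem.Dict.ofList pairs).items

-- ===== PRECONDITION & SPEC =====
def Spec_parse_length_hist (rows : List (List String)) (out : List (Int × Int)) : Prop := out = parse_length_hist_alt rows
instance (rows : List (List String)) (out : List (Int × Int)) : Decidable (Spec_parse_length_hist rows out) := by unfold Spec_parse_length_hist; infer_instance

-- ===== CLAIM (what is proved, stated in full; the proofs are below) =====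
def Claim_equal_parse_length_hist : Prop := ∀ (rows : List (List String)), Dom_parse_length_hist rows → Spec_parse_length_hist rows (parse_length_hist rows)

-- ===== LEMMAS AND PROOFS =====

-- the per-row extraction both loops perform
def pvExt (li : Nat) (r : List String) : Option Int :=
  if r.length ≤ li then none else (PySem.List.pyGet? r (li : Int)).bind PySem.Int.ofStr?

theorem pv_foldl_ext {β : Type} (li : Nat) (f : β → Int → β) (l : List (List String)) (init : β) :
    l.foldl (fun acc r => match pvExt li r with | none => acc | some L => f acc L) init
      = (l.filterMap (pvExt li)).foldl f init := by
  induction l generalizing init with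
  | nil => rfl
  | cons r t ih =>
    simp only [List.foldl_cons, List.filterMap_cons]
    cases pvExt li r <;> simp [ih]

theorem pv_body_eq {β : Type} (li : Nat) (f : β → Int → β) :
    (fun (acc : β) (r : List String) =>
      if r.length ≤ li then acc
      else match PySem.List.pyGet? r (li : Int) with
        | none => acc
        | some s => match PySem.Int.ofStr? s with
          | none => acc
          | some L => f acc L)
    = (fun acc r => match pvExt li r with | none => acc | some L => f acc L) := by
  funext acc r
  unfold pvExt
  by_cases hr : r.length ≤ li
  · simp [hr]
  · simp only [if_neg hr]
    cases PySem.List.pyGet? r (li : Int) with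
    | none => rfl
    | some s => cases PySem.Int.ofStr? s <;> rfl

theorem pv_insertBy_congr {α : Type} (b1 b2 : α → α → Bool) (x : α) (acc : List α)
    (h : ∀ y ∈ acc, b1 x y = b2 x y) :
    PySem.List.insertBy b1 x acc = PySem.List.insertBy b2 x acc := by
  induction acc with
  | nil => rfl
  | cons y t ih =>
    simp only [PySem.List.insertBy]
    rw [h y (by simp)]
    split
    · rfl
    · rw [ih (fun z hz => h z (by simp [hz]))]

theorem pv_foldl_insertBy_congr {α : Type} (b1 b2 : α → α → Bool) (l acc : List α)
    (h : ∀ a ∈ l, ∀ b, (b ∈ l ∨ b ∈ acc) → b1 a b = b2 a b) :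
    l.foldl (fun acc x => PySem.List.insertBy b1 x acc) acc
      = l.foldl (fun acc x => PySem.List.insertBy b2 x acc) acc := by
  induction l generalizing acc with
  | nil => rfl
  | cons x t ih =>
    simp only [List.foldl_cons]
    rw [pv_insertBy_congr b1 b2 x acc (fun y hy => h x (by simp) y (Or.inr hy))]
    exact ih _ (fun a ha b hb => h a (by simp [ha]) b (by
      rcases hb with hb | hb
      · exact Or.inl (by simp [hb])
      · rcases (PySem.List.mem_insertBy b2 x b acc).1 hb with rfl | hb
        · exact Or.inl (by simp)
        · exact Or.inr hb))

-- sorted2 with pairwise-distinct first components is the sort by the first component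
theorem pv_sorted2_eq_sorted_fst (xs : List (Int × Int)) (h : (xs.map Prod.fst).Nodup) :
    PySem.List.sorted2 xs Prod.fst Prod.snd = PySem.List.sorted xs Prod.fst := by
  show xs.foldl (fun acc x => PySem.List.insertBy _ x acc) [] = xs.foldl (fun acc x => PySem.List.insertBy _ x acc) []
  apply pv_foldl_insertBy_congr
  intro a ha b hb
  rcases hb with hb | hb
  · rcases lt_trichotomy a.1 b.1 with hlt | heq | hgt
    · simp [hlt]
    · have hab : a = b := List.inj_on_of_nodup_map h ha hb heq
      subst hab
      simp
    · simp [hgt, not_lt_of_gt hgt]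
  · simp at hb

theorem pv_addRun_ne_nil (acc : List (Int × Int)) (v : Int) : pvAddRun acc v ≠ [] := by
  unfold pvAddRun
  cases acc.getLast? with
  | none => simp
  | some kc =>
    by_cases hc : kc.1 = v <;> simp [hc]

theorem pv_foldl_addRun_shift (s : List Int) (P acc : List (Int × Int)) (hacc : acc ≠ []) :
    s.foldl pvAddRun (P ++ acc) = P ++ s.foldl pvAddRun acc := by
  induction s generalizing P acc with
  | nil => simp
  | cons v t ih =>
    simp only [List.foldl_cons]
    have hlast : (P ++ acc).getLast? = acc.getLast? := List.getLast?_append_of_ne_nil P hacc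
    have step : pvAddRun (P ++ acc) v = P ++ pvAddRun acc v := by
      unfold pvAddRun
      rw [hlast]
      cases hk : acc.getLast? with
      | none => simp at hk; exact absurd hk hacc
      | some kc =>
        rw [List.dropLast_append_of_ne_nil hacc (l' := P)]
        simp only [List.append_assoc]
        exact (apply_ite (fun z => P ++ z) _ _ _).symm
    rw [step]
    exact ih _ _ (pv_addRun_ne_nil acc v)

theorem pv_foldl_addRun_replicate (m : Nat) (k : Int) (c : Int) :
    (List.replicate m k).foldl pvAddRun [(k, c)] = [(k, c + m)] := by
  induction m generalizing c with
  | zero => simp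
  | succ j ih =>
    rw [List.replicate_succ, List.foldl_cons]
    have : pvAddRun [(k, c)] k = [(k, c + 1)] := by simp [pvAddRun]
    rw [this, ih]
    congr 2
    push_cast
    ring

theorem pv_foldl_setAdd_shift (d : List Int) (p : Int) (acc : List Int) (hp : p ∉ d) :
    d.foldl PySem.Set.add (p :: acc) = p :: d.foldl PySem.Set.add acc := by
  induction d generalizing acc with
  | nil => rfl
  | cons y t ih =>
    have hyp : ¬ (y == p) = true := by
      intro hb
      exact hp (by simp [(by exact beq_iff_eq.1 hb : y = p)])
    simp only [List.foldl_cons]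
    have hstep : PySem.Set.add (p :: acc) y = p :: PySem.Set.add acc y := by
      have hyp' : (y == p) = false := by simpa using hyp
      simp only [PySem.Set.add, PySem.Set.contains, List.elem_cons, hyp']
      simp only [show List.contains acc y = List.elem y acc from rfl]
      cases List.elem y acc <;> simp
    rw [hstep]
    exact ih _ (fun hmem => hp (List.mem_cons_of_mem y hmem))

theorem pv_head_dropWhile_false {α : Type} (p : α → Bool) (l : List α) (x0 : α) (d' : List α)
    (h : l.dropWhile p = x0 :: d') : p x0 = false := by
  induction l with
  | nil => simp at h
  | cons y t ih =>
    rw [List.dropWhile_cons] at h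
    by_cases hy : p y = true
    · exact ih (by rwa [if_pos hy] at h)
    · rw [if_neg hy] at h
      cases h
      simpa using hy

-- all elements of the dropWhile-(== k) remainder of a sorted tail are > k
theorem pv_drop_gt (k : Int) (t : List Int) (h : List.Pairwise (· ≤ ·) (k :: t)) :
    ∀ x ∈ t.dropWhile (fun y => y == k), k < x := by
  cases hd : t.dropWhile (fun y => y == k) with
  | nil => simp
  | cons x0 d' =>
    have hkle : ∀ x ∈ t, k ≤ x := (List.pairwise_cons.1 h).1
    have hx0 : (x0 == k) = false := pv_head_dropWhile_false _ t x0 d' hd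
    have hx0t : x0 ∈ t := (List.dropWhile_sublist _).mem (by rw [hd]; simp)
    have hkx0 : k < x0 := lt_of_le_of_ne (hkle x0 hx0t) (fun he => by simp [he.symm] at hx0)
    have hpair : List.Pairwise (· ≤ ·) (x0 :: d') := by
      rw [← hd]
      exact List.Pairwise.sublist ((List.dropWhile_sublist _).trans (List.sublist_cons_self k t)) h
    intro x hx
    rcases List.mem_cons.1 hx with rfl | hx
    · exact hkx0
    · exact lt_of_lt_of_le hkx0 ((List.pairwise_cons.1 hpair).1 x hx)

theorem pv_foldl_setAdd_k (j : Nat) (k : Int) :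
    (List.replicate j k).foldl PySem.Set.add [k] = [k] := by
  induction j with
  | zero => rfl
  | succ i ih =>
    rw [List.replicate_succ, List.foldl_cons]
    have : PySem.Set.add [k] k = [k] := by
      simp [PySem.Set.add, PySem.Set.contains]
    rw [this, ih]

theorem pv_set_cons (k : Int) (t : List Int) (h : List.Pairwise (· ≤ ·) (k :: t)) :
    PySem.Set.ofList (k :: t) = k :: PySem.Set.ofList (t.dropWhile (fun y => y == k)) := by
  have hkd : k ∉ t.dropWhile (fun y => y == k) := fun hk => lt_irrefl k (pv_drop_gt k t h k hk)
  have hw : t.takeWhile (fun y => y == k) = List.replicate (t.takeWhile (fun y => y == k)).length k :=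
    List.eq_replicate_of_mem (fun b hb => by simpa using List.mem_takeWhile_imp hb)
  rw [PySem.Set.ofList_eq_foldl, PySem.Set.ofList_eq_foldl]
  rw [show k :: t = k :: (t.takeWhile (fun y => y == k) ++ t.dropWhile (fun y => y == k)) from by
        rw [List.takeWhile_append_dropWhile]]
  rw [List.foldl_cons, show PySem.Set.add [] k = [k] from rfl, List.foldl_append]
  rw [hw, pv_foldl_setAdd_k]
  exact pv_foldl_setAdd_shift _ k [] hkd

-- run-length encoding of a sorted list, in closed form
theorem pv_rle_eq (s : List Int) (h : List.Pairwise (· ≤ ·) s) :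
    s.foldl pvAddRun [] = (PySem.Set.ofList s).map (fun k => (k, (List.count k s : Int))) := by
  match s with
  | [] => rfl
  | k :: t =>
    have hgt := pv_drop_gt k t h
    set d := t.dropWhile (fun y => y == k) with hd
    set w := t.takeWhile (fun y => y == k) with hwdef
    have hkd : k ∉ d := fun hk => lt_irrefl k (hgt k hk)
    have hw : w = List.replicate w.length k :=
      List.eq_replicate_of_mem (fun b hb => by simpa using List.mem_takeWhile_imp hb)
    have hwd : w ++ d = t := List.takeWhile_append_dropWhile
    have hdp : List.Pairwise (· ≤ ·) d :=
      List.Pairwise.sublist ((List.dropWhile_sublist _).trans (List.sublist_cons_self k t)) h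
    have ih := pv_rle_eq d hdp
    have hL : (k :: t).foldl pvAddRun [] = (k, (1 : Int) + w.length) :: d.foldl pvAddRun [] := by
      rw [List.foldl_cons, show pvAddRun [] k = [(k, 1)] from rfl, ← hwd, List.foldl_append]
      rw [hw, pv_foldl_addRun_replicate]
      cases hcd : d with
      | nil => simp
      | cons x0 d' =>
        have hx0 : (k == x0) = false := by
          have := hgt x0 (by rw [hcd]; simp)
          simp [ne_of_lt this]
        rw [List.foldl_cons]
        have hstep : pvAddRun [(k, (1 : Int) + w.length)] x0 = [(k, (1 : Int) + w.length), (x0, 1)] := by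
          simp [pvAddRun, hx0]
        rw [hstep,
          show [(k, (1 : Int) + ↑w.length), (x0, (1:Int))] = [(k, (1 : Int) + ↑w.length)] ++ [(x0, (1:Int))] from rfl,
          pv_foldl_addRun_shift d' _ _ (by simp)]
        simp [List.foldl_cons, show pvAddRun [] x0 = [(x0, 1)] from rfl]
    rw [hL, ih, pv_set_cons k t h, List.map_cons]
    congr 1
    · have hck : List.count k (k :: t) = 1 + w.length := by
        rw [List.count_cons_self, ← hwd, List.count_append, hw, List.count_replicate]
        simp [List.count_eq_zero.2 hkd, Nat.add_comm]
      rw [hck]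
      push_cast
      ring_nf
    · apply List.map_congr_left
      intro j hj
      have hjd : j ∈ d := by simpa [PySem.Set.mem_ofList] using hj
      have hjk : (j == k) = false := by simp [ne_of_gt (hgt j hjd)]
      have hne : ¬ k = j := fun he => by simp [he] at hjk
      congr 1
      rw [← hwd, List.count_cons, List.count_append, hw, List.count_replicate]
      simp [hne]
termination_by s.length
decreasing_by
  exact Nat.lt_succ_of_le (List.length_dropWhile_le _ _)

theorem pv_set_sorted_pairwise (s : List Int) (h : List.Pairwise (· ≤ ·) s) :
    List.Pairwise (· < ·) (PySem.Set.ofList s) := by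
  match s with
  | [] => exact List.Pairwise.nil
  | k :: t =>
    have hdp : List.Pairwise (· ≤ ·) (t.dropWhile (fun y => y == k)) :=
      List.Pairwise.sublist ((List.dropWhile_sublist _).trans (List.sublist_cons_self k t)) h
    rw [pv_set_cons k t h]
    refine List.pairwise_cons.2 ⟨?_, pv_set_sorted_pairwise _ hdp⟩
    intro a ha
    exact pv_drop_gt k t h a (by simpa [PySem.Set.mem_ofList] using ha)
termination_by s.length
decreasing_by
  exact Nat.lt_succ_of_le (List.length_dropWhile_le _ _)

-- the core: counter-then-sort equals sort-then-run-length-encode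
theorem pv_core (vals : List Int) :
    PySem.List.sorted2 (PySem.Dict.counter vals).items Prod.fst Prod.snd
      = (PySem.List.sorted vals (fun x => x)).foldl pvAddRun [] := by
  have hsp : List.Pairwise (· ≤ ·) (PySem.List.sorted vals (fun x => x)) :=
    PySem.List.sorted_pairwise vals (fun x => x)
  set s := PySem.List.sorted vals (fun x => x) with hs
  have hR := pv_rle_eq s hsp
  have hperm : s.Perm vals := PySem.List.sorted_perm vals (fun x => x) false
  have hmem : ∀ x, x ∈ PySem.Set.ofList s ↔ x ∈ PySem.Set.ofList vals := by
    intro x; rw [PySem.Set.mem_ofList, PySem.Set.mem_ofList]; exact hperm.mem_iff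
  have hsetperm : (PySem.Set.ofList s).Perm (PySem.Set.ofList vals) :=
    (List.perm_ext_iff_of_nodup (PySem.Set.nodup_ofList s) (PySem.Set.nodup_ofList vals)).mpr hmem
  have hR' : s.foldl pvAddRun [] = (PySem.Set.ofList s).map (fun k => (k, (List.count k vals : Int))) := by
    rw [hR]; exact List.map_congr_left (fun j hj => by rw [hperm.count_eq])
  have hitems : (PySem.Dict.counter vals).items
      = (PySem.Set.ofList vals).map (fun k => (k, (List.count k vals : Int))) :=
    PySem.Dict.items_counter vals
  have hpermitems : (s.foldl pvAddRun []).Perm (PySem.Dict.counter vals).items := by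
    rw [hR', hitems]; exact hsetperm.map _
  have hpair : List.Pairwise (fun a b => a.1 < b.1) (s.foldl pvAddRun []) := by
    rw [hR']
    exact List.pairwise_map.2 ((pv_set_sorted_pairwise s hsp).imp (fun hab => hab))
  have hnodup : ((PySem.Dict.counter vals).items.map Prod.fst).Nodup := by
    have := PySem.Dict.nodup_keys_counter vals
    simpa [PySem.Dict.keys] using this
  rw [pv_sorted2_eq_sorted_fst _ hnodup]
  exact PySem.List.sorted_eq_of_perm_of_pairwise_lt _ _ Prod.fst hpermitems hpair

theorem pv_main (rows : List (List String)) : parse_length_hist rows = parse_length_hist_alt rows := by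
  unfold parse_length_hist parse_length_hist_alt
  match rows with
  | [] => rfl
  | r0 :: rest =>
    by_cases hlen : (r0 :: rest).length < 2
    · simp only [if_pos hlen]
    · simp only [if_neg hlen]
      cases hidx : PySem.List.index? (r0.map fun h => PySem.Str.lower (PySem.Str.strip h)) "length" with
      | none => rfl
      | some li =>
        simp only []
        rw [pv_body_eq li (fun (d : PySem.Dict Int Int) L => d.insert L (d.getD L 0 + 1)),
            pv_body_eq li (fun (acc : List Int) L => acc ++ [L]),
            pv_foldl_ext, pv_foldl_ext,
            PySem.Dict.foldl_insert_getD_add_one_eq_counter,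
            PySem.List.foldl_append_singleton_eq_self,
            pv_core, List.nil_append]

-- ===== VERDICT (by name: the statement is the Claim_ definition above) =====
theorem parse_length_hist_spec : Claim_equal_parse_length_hist := by
  intro rows _
  unfold Spec_parse_length_hist
  exact pv_main rows
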